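-- pv_equiv track=rewrite | github.com/pypi-data/pypi-mirror-129 | packages/libtgmk/libtgmk-0.4.2-py3-none-any.whl/libtgmk/__init__.py | tgmk2int
-- ===== SOURCE A (Python) =====
-- def tgmk2int(s):
--     '''convert TGMK literal s (normalized or not) into an integer:
--
--     >>> tgmk2int('-3000k1)
--     -3072001
-- '''
--     if not isinstance(s, str):
--         raise TypeError(f'invalid argument type for tgmk2int(): {s!r} is not a str')
--     else:
--         try:
--             tgmk = s.strip().upper()
--             sign, exp0, num, coef = 1, 9, 0, None
--             if tgmk.startswith('+'):
--                 tgmk = tgmk[1:]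
--             elif tgmk.startswith('-'):
--                 sign, tgmk = -1, tgmk[1:]
--             assert tgmk # empty string --> AssertionError
--             for char in tgmk:
--                 if '0' <= char <= '9':
--                     coef = (coef or 0) * 10 + ord(char) - 48 # 48 == ord('0')
--                 else:
--                     exp = 'KMGTPEZY'.index(char) + 1 # char not found --> ValueError
--                     assert exp0 > exp # non decreasing characteristic --> AssertionError
--                     exp0 = exp
--                     num += coef * 1024 ** exp # empty mantissa --> coef is None --> TypeError
--                     coef = None
--             return sign * (num + (coef or 0))
--         except (TypeError, ValueError, AssertionError):
--             raise ValueError(f'invalid TGMK literal for tgmk2int(): {s!r}')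
-- ===== SOURCE B (Python) =====
-- def tgmk2int(s):
--     '''convert TGMK literal s (normalized or not) into an integer, by
--     tokenizing into (digit-run, exponent) segments and summing them.'''
--     if not isinstance(s, str):
--         raise TypeError(f'invalid argument type for tgmk2int(): {s!r} is not a str')
--     t = s.strip().upper()
--     sign = 1
--     if t.startswith('+'):
--         t = t[1:]
--     elif t.startswith('-'):
--         sign, t = -1, t[1:]
--     SUFFIXES = 'KMGTPEZY'
--     # pass 1: tokenize into (digit-run, exponent); the trailing run gets exponent 0
--     tokens, run = [], ''
--     for ch in t:
--         if '0' <= ch <= '9':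
--             run += ch
--         elif ch in SUFFIXES:
--             tokens.append((run, SUFFIXES.index(ch) + 1))
--             run = ''
--         else:
--             raise ValueError(f'invalid TGMK literal for tgmk2int(): {s!r}')
--     tokens.append((run, 0))
--     # pass 2: validate shape
--     if (not t
--             or any(r == '' for r, _ in tokens[:-1])
--             or any(tokens[i][1] <= tokens[i + 1][1] for i in range(len(tokens) - 1))):
--         raise ValueError(f'invalid TGMK literal for tgmk2int(): {s!r}')
--     # pass 3: evaluate
--     return sign * sum(int(r or '0') * 1024 ** e for r, e in tokens)
-- ===== Notes on version B (the rewrite author's own statement) =====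
-- stated objective: alternative
-- what changed: A parses with one fused loop over mutable state (exp0, num, coef) that validates and accumulates simultaneously; B first tokenizes the body into (digit-run, exponent) segments, then validates the shape (nonempty, mandatory mantissas, strictly decreasing exponents) in a separate pass, then sums int(run)*1024**exp over the tokens.
import Mathlib
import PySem

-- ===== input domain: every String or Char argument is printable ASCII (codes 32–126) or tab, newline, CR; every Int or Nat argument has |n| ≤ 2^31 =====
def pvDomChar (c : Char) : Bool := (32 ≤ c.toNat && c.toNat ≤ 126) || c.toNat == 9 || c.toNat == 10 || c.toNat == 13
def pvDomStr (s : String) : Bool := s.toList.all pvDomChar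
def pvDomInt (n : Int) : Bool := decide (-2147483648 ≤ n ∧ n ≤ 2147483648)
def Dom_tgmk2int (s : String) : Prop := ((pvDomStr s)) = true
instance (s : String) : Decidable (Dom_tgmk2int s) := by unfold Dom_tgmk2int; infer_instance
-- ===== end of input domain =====

-- B re-implements A's fused parse loop as three passes (tokenize into (digit-run, exponent)
-- segments, validate the shape, then sum); same return value wherever A returns.

-- shared small helpers (character classes of the TGMK alphabet)
def tgmkSUF : List Char := ['K', 'M', 'G', 'T', 'P', 'E', 'Z', 'Y']  -- = 'KMGTPEZY'

def digB (c : Char) : Bool := decide ('0' ≤ c ∧ c ≤ '9')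

def idxC (c : Char) : Nat := tgmkSUF.idxOf c

-- ===== PORT A =====
-- the for-loop of A over state (exp0, num, coef); none = an exception was raised
def tgmkLoopA : Int → Int → Option Int → List Char → Option (Int × Option Int)
  | _, num, coef, [] => some (num, coef)
  | exp0, num, coef, c :: cs =>
    if digB c then
      tgmkLoopA exp0 num (some ((coef.getD 0) * 10 + ((c.toNat : Int) - 48))) cs
    else
      match PySem.List.index? tgmkSUF c with
      | none => none  -- ValueError from 'KMGTPEZY'.index(char)
      | some i =>
        if exp0 > (i : Int) + 1 then
          match coef with
          | none => none  -- TypeError: empty mantissa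
          | some cf => tgmkLoopA ((i : Int) + 1) (num + cf * (1024 : Int) ^ (i + 1)) none cs
        else none  -- AssertionError: non-decreasing characteristic

def tgmk2int (s : String) : Int :=
  let l0 := PySem.Chars.upper (PySem.Chars.strip s.toList)
  let sign : Int := if PySem.Chars.startswith l0 ['+'] then 1
    else if PySem.Chars.startswith l0 ['-'] then -1 else 1
  let l : List Char := if PySem.Chars.startswith l0 ['+'] then l0.drop 1
    else if PySem.Chars.startswith l0 ['-'] then l0.drop 1 else l0
  if l.isEmpty then 0  -- assert tgmk fails (raise); value irrelevant, outside Pre_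
  else
    match tgmkLoopA 9 0 none l with
    | none => 0  -- raise; outside Pre_
    | some (num, coef) => sign * (num + coef.getD 0)

-- ===== PORT B =====
-- pass 1 of B: split into (digit-run, exponent) tokens, trailing run gets exponent 0
def tgmkTok : List Char → List Char → Option (List (List Char × Nat))
  | run, [] => some [(run, 0)]
  | run, c :: cs =>
    if digB c then tgmkTok (run ++ [c]) cs
    else
      match PySem.List.index? tgmkSUF c with
      | none => none  -- ValueError: bad character
      | some i => (tgmkTok [] cs).map ((run, i + 1) :: ·)

-- B's int(r or '0')
def runVal (run : List Char) : Int := run.foldl (fun a c => a * 10 + ((c.toNat : Int) - 48)) 0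

-- B's check: every token except the trailing one has a nonempty digit run
def mantOKB (toks : List (List Char × Nat)) : Bool := toks.dropLast.all (fun p => !p.1.isEmpty)

-- B's check: adjacent exponents strictly decreasing
def adjOKB : List (List Char × Nat) → Bool
  | (_, e1) :: (r2, e2) :: rest => decide (e2 < e1) && adjOKB ((r2, e2) :: rest)
  | _ => true

def tgmk2int_alt (s : String) : Int :=
  let l0 := PySem.Chars.upper (PySem.Chars.strip s.toList)
  let sign : Int := if PySem.Chars.startswith l0 ['+'] then 1
    else if PySem.Chars.startswith l0 ['-'] then -1 else 1
  let l : List Char := if PySem.Chars.startswith l0 ['+'] then l0.drop 1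
    else if PySem.Chars.startswith l0 ['-'] then l0.drop 1 else l0
  match tgmkTok [] l with
  | none => 0  -- raise; outside Pre_
  | some toks =>
    if l.isEmpty || !mantOKB toks || !adjOKB toks then 0  -- raise; outside Pre_
    else sign * (toks.map (fun p => runVal p.1 * (1024 : Int) ^ p.2)).sum

-- ===== PRECONDITION & SPEC =====
-- exponent list (idx+1 of each suffix letter, in order) of the body
def sufExpsN (l : List Char) : List Nat := (l.filter (fun c => !digB c)).map (fun c => idxC c + 1)

-- Pre_ = exactly the strings A parses without raising: after strip/upper and removing one
-- optional sign, the body is nonempty, made of digits and KMGTPEZY only, starts with a digit,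
-- has no two adjacent suffix letters (each suffix has a mantissa), and its suffix exponents
-- strictly decrease left to right.
-- the body of the literal: strip/upper, one optional leading sign removed
def tgmkBody (s : String) : List Char :=
  let l0 := PySem.Chars.upper (PySem.Chars.strip s.toList)
  if PySem.Chars.startswith l0 ['+'] then l0.drop 1
  else if PySem.Chars.startswith l0 ['-'] then l0.drop 1 else l0

def Pre_tgmk2int (s : String) : Prop :=
  tgmkBody s ≠ [] ∧ (tgmkBody s).all (fun c => digB c || tgmkSUF.contains c) = true ∧
    (tgmkBody s).head?.all digB = true ∧
    List.IsChain (fun a b => digB a || digB b) (tgmkBody s) ∧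
    List.IsChain (· > ·) (sufExpsN (tgmkBody s))

instance (s : String) : Decidable (Pre_tgmk2int s) := by unfold Pre_tgmk2int; infer_instance

def pvWitness_tgmk2int : String := "2k1"

def Spec_tgmk2int (s : String) (out : Int) : Prop := out = tgmk2int_alt s
instance (s : String) (out : Int) : Decidable (Spec_tgmk2int s out) := by unfold Spec_tgmk2int; infer_instance

-- ===== CLAIM (what is proved, stated in full; the proofs are below) =====
def Claim_equal_tgmk2int : Prop := ∀ (s : String), Dom_tgmk2int s → Pre_tgmk2int s → Spec_tgmk2int s (tgmk2int s)

-- ===== LEMMAS AND PROOFS =====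

-- reference evaluation of a body: current digit run `run`, rest `cs`
def evalT : List Char → List Char → Int
  | run, [] => runVal run
  | run, c :: cs =>
    if digB c then evalT (run ++ [c]) cs
    else runVal run * (1024 : Int) ^ (idxC c + 1) + evalT [] cs

-- "every suffix letter is preceded by a digit", with flag = current digit run nonempty
def mantB : Bool → List Char → Bool
  | _, [] => true
  | b, c :: cs => if digB c then mantB true cs else b && mantB false cs

def optOfRun (run : List Char) : Option Int :=
  if run.isEmpty then none else some (runVal run)

theorem runVal_append (run : List Char) (c : Char) :
    runVal (run ++ [c]) = runVal run * 10 + ((c.toNat : Int) - 48) := by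
  simp [runVal, List.foldl_append]

theorem optOfRun_getD (run : List Char) : (optOfRun run).getD 0 = runVal run := by
  cases run <;> simp [optOfRun, runVal]

theorem snoc_not_empty (run : List Char) (c : Char) : (!(run ++ [c]).isEmpty) = true := by
  simp

theorem idx_spec (c : Char) (hc : c ∈ tgmkSUF) :
    PySem.List.index? tgmkSUF c = some (idxC c) ∧ idxC c < 8 := by
  fin_cases hc <;> exact ⟨by decide, by decide⟩

-- A's loop computes evalT on every valid body
theorem loopA_eval (cs : List Char) : ∀ (run : List Char) (exp0 num : Int),
    (∀ c ∈ cs, digB c = true ∨ c ∈ tgmkSUF) →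
    List.IsChain (· > ·) (exp0 :: (sufExpsN cs).map (Nat.cast : Nat → Int)) →
    mantB (!run.isEmpty) cs = true →
    (tgmkLoopA exp0 num (optOfRun run) cs).map (fun p => p.1 + p.2.getD 0)
      = some (num + evalT run cs) := by
  induction cs with
  | nil =>
    intro run exp0 num _ _ _
    simp [tgmkLoopA, evalT, optOfRun_getD]
  | cons c cs ih =>
    intro run exp0 num hall hchain hmant
    by_cases hd : digB c = true
    · have hstep : tgmkLoopA exp0 num (optOfRun run) (c :: cs)
          = tgmkLoopA exp0 num (optOfRun (run ++ [c])) cs := by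
        have : optOfRun (run ++ [c])
            = some ((optOfRun run).getD 0 * 10 + ((c.toNat : Int) - 48)) := by
          rw [optOfRun_getD, ← runVal_append]
          simp [optOfRun]
        rw [this]
        simp [tgmkLoopA, hd]
      have h2 : mantB (!(run ++ [c]).isEmpty) cs = true := by
        rw [snoc_not_empty]
        simpa [mantB, hd] using hmant
      have h3 : sufExpsN (c :: cs) = sufExpsN cs := by simp [sufExpsN, hd]
      rw [h3] at hchain
      rw [hstep, ih (run ++ [c]) exp0 num (fun x hx => hall x (by simp [hx])) hchain h2]
      simp [evalT, hd]
    · have hc : c ∈ tgmkSUF := (hall c (by simp)).resolve_left hd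
      obtain ⟨hidx, _⟩ := idx_spec c hc
      have h3 : sufExpsN (c :: cs) = (idxC c + 1) :: sufExpsN cs := by
        simp [sufExpsN, hd]
      rw [h3] at hchain
      simp only [List.map_cons, List.isChain_cons_cons] at hchain
      obtain ⟨hgt0, hchain'⟩ := hchain
      have hgt : exp0 > (idxC c : Int) + 1 := by exact_mod_cast hgt0
      have hchain'' : List.IsChain (· > ·)
          (((idxC c : Int) + 1) :: (sufExpsN cs).map (Nat.cast : Nat → Int)) := by
        have hcast : ((idxC c + 1 : Nat) : Int) = (idxC c : Int) + 1 := by push_cast; ring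
        rw [hcast] at hchain'
        exact hchain'
      have hmant' : (!run.isEmpty) = true ∧ mantB false cs = true := by
        simpa [mantB, hd] using hmant
      have hrune : run ≠ [] := by simpa using hmant'.1
      have hrun : optOfRun run = some (runVal run) := by
        simp [optOfRun, hrune]
      have hstep : tgmkLoopA exp0 num (optOfRun run) (c :: cs)
          = tgmkLoopA ((idxC c : Int) + 1)
              (num + runVal run * (1024 : Int) ^ (idxC c + 1)) none cs := by
        have hidx2 : List.idxOf? c tgmkSUF = some (idxC c) := by simpa using hidx
        rw [hrun]
        simp [tgmkLoopA, hd, hidx2, hgt]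
      have hih := ih [] ((idxC c : Int) + 1) (num + runVal run * (1024 : Int) ^ (idxC c + 1))
        (fun x hx => hall x (by simp [hx])) hchain'' hmant'.2
      have hnone : optOfRun ([] : List Char) = none := rfl
      rw [hnone] at hih
      rw [hstep, hih]
      simp only [Option.some.injEq, evalT, hd, Bool.false_eq_true, if_false]
      ring

-- B's tokenizer: tokens exist, their exponents are the suffix exponents plus a trailing 0,
-- the mantissa check passes, and the token sum is evalT
theorem tok_eval (cs : List Char) : ∀ (run : List Char),
    (∀ c ∈ cs, digB c = true ∨ c ∈ tgmkSUF) →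
    ∃ toks, tgmkTok run cs = some toks ∧
      toks.map Prod.snd = sufExpsN cs ++ [0] ∧
      (mantB (!run.isEmpty) cs = true → mantOKB toks = true) ∧
      (toks.map (fun p => runVal p.1 * (1024 : Int) ^ p.2)).sum = evalT run cs := by
  induction cs with
  | nil =>
    intro run _
    exact ⟨[(run, 0)], by simp [tgmkTok], by simp [sufExpsN], by simp [mantOKB], by
      simp [evalT]⟩
  | cons c cs ih =>
    intro run hall
    by_cases hd : digB c = true
    · obtain ⟨toks, h1, h2, h3, h4⟩ := ih (run ++ [c]) (fun x hx => hall x (by simp [hx]))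
      rw [snoc_not_empty] at h3
      refine ⟨toks, by simpa [tgmkTok, hd] using h1, by simpa [sufExpsN, hd] using h2, ?_, by
        simpa [evalT, hd] using h4⟩
      intro hm
      exact h3 (by simpa [mantB, hd] using hm)
    · have hc : c ∈ tgmkSUF := (hall c (by simp)).resolve_left hd
      obtain ⟨hidx, _⟩ := idx_spec c hc
      have hidx2 : List.idxOf? c tgmkSUF = some (idxC c) := by simpa using hidx
      obtain ⟨toks, h1, h2, h3, h4⟩ := ih [] (fun x hx => hall x (by simp [hx]))
      have htne : toks ≠ [] := by
        intro h; rw [h] at h2; exact absurd h2.symm (by simp)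
      refine ⟨(run, idxC c + 1) :: toks, by simp [tgmkTok, hd, hidx2, h1], by
        simp [sufExpsN, hd, h2], ?_, by simp [h4, evalT, hd]⟩
      intro hm
      have hm' : (!run.isEmpty) = true ∧ mantB false cs = true := by
        simpa [mantB, hd] using hm
      have hok : mantOKB toks = true := h3 (by simpa using hm'.2)
      simp only [mantOKB, List.dropLast_cons_of_ne_nil htne, List.all_cons]
      simp only [mantOKB] at hok
      simp [hm'.1, hok]

theorem adjOKB_of_chain (toks : List (List Char × Nat))
    (h : List.IsChain (· > ·) (toks.map Prod.snd)) : adjOKB toks = true := by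
  induction toks with
  | nil => rfl
  | cons p toks ih =>
    match toks, p with
    | [], _ => rfl
    | (r2, e2) :: rest, (r1, e1) =>
      simp only [List.map_cons, List.isChain_cons_cons] at h
      simpa [adjOKB, h.1] using ih h.2

-- every suffix exponent is positive
theorem sufExpsN_pos (l : List Char) : ∀ e ∈ sufExpsN l, 0 < e := by
  intro e he
  simp only [sufExpsN, List.mem_map] at he
  obtain ⟨c, _, rfl⟩ := he
  omega

theorem mant_of_chain (l : List Char)
    (h : List.IsChain (fun a b => digB a || digB b) l) :
    mantB true l = true ∧ (l.head?.all digB = true → mantB false l = true) := by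
  induction l with
  | nil => exact ⟨rfl, fun _ => rfl⟩
  | cons c cs ih =>
    rw [List.isChain_cons] at h
    obtain ⟨hhd, hcs⟩ := h
    obtain ⟨ih1, ih2⟩ := ih hcs
    by_cases hd : digB c = true
    · exact ⟨by simpa [mantB, hd] using ih1, fun _ => by simpa [mantB, hd] using ih1⟩
    · have hcshd : mantB false cs = true := by
        cases cs with
        | nil => rfl
        | cons d ds =>
          have hdd : digB d = true := by
            have := hhd d rfl
            simpa [hd] using this
          exact ih2 (by simpa using hdd)
      exact ⟨by simpa [mantB, hd] using hcshd, fun hh => by simp [hd] at hh⟩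

-- the two cores agree on every valid body
theorem core_eq (l : List Char) (sign : Int)
    (h1 : l ≠ []) (h2 : ∀ c ∈ l, digB c = true ∨ c ∈ tgmkSUF)
    (h3 : l.head?.all digB = true)
    (h4 : List.IsChain (fun a b => digB a || digB b) l)
    (h5 : List.IsChain (· > ·) (sufExpsN l)) :
    (if l.isEmpty then (0 : Int)
     else match tgmkLoopA 9 0 none l with
       | none => 0
       | some (num, coef) => sign * (num + coef.getD 0)) =
    (match tgmkTok [] l with
     | none => 0
     | some toks =>
       if l.isEmpty || !mantOKB toks || !adjOKB toks then 0
       else sign * (toks.map (fun p => runVal p.1 * (1024 : Int) ^ p.2)).sum) := by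
  have hmant : mantB false l = true := (mant_of_chain l h4).2 h3
  have hlt9 : ∀ e ∈ sufExpsN l, e < 9 := by
    intro e he
    simp only [sufExpsN, List.mem_map, List.mem_filter] at he
    obtain ⟨c, ⟨hcl, hcd⟩, rfl⟩ := he
    have hc : c ∈ tgmkSUF := (h2 c hcl).resolve_left (by simpa using hcd)
    have := (idx_spec c hc).2
    omega
  have hmapchain : List.IsChain (· > ·) ((sufExpsN l).map (Nat.cast : Nat → Int)) :=
    List.isChain_map_of_isChain _ (fun a b hab => by exact_mod_cast hab) h5
  have hchainI : List.IsChain (· > ·) ((9 : Int) :: (sufExpsN l).map (Nat.cast : Nat → Int)) := by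
    cases hsl : sufExpsN l with
    | nil => simp
    | cons e rest =>
      rw [hsl, List.map_cons] at hmapchain
      rw [List.map_cons, List.isChain_cons_cons]
      refine ⟨?_, hmapchain⟩
      have : e < 9 := hlt9 e (by rw [hsl]; exact List.mem_cons_self)
      exact_mod_cast this
  have hA := loopA_eval l [] 9 0 h2 hchainI (by simpa using hmant)
  have hnone : optOfRun ([] : List Char) = none := rfl
  rw [hnone] at hA
  obtain ⟨toks, hB1, hB2, hB3, hB4⟩ := tok_eval l [] h2
  have hmOK : mantOKB toks = true := hB3 (by simpa using hmant)
  have hadj : adjOKB toks = true := by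
    apply adjOKB_of_chain
    rw [hB2]
    apply List.IsChain.append h5 (by simp)
    intro x hx y hy
    simp only [List.head?_cons, Option.mem_def, Option.some.injEq] at hy
    subst hy
    exact sufExpsN_pos l x (List.mem_of_getLast? hx)
  have hne : l.isEmpty = false := by simpa using h1
  rw [hne, hB1]
  simp only [hmOK, hadj, Bool.not_true, Bool.or_false]
  rw [hB4]
  cases hres : tgmkLoopA 9 0 none l with
  | none => rw [hres] at hA; simp at hA
  | some p =>
    rw [hres] at hA
    simp only [Option.map_some, Option.some.injEq] at hA
    cases p with
    | mk num coef =>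
      simp only at hA
      simp [hA]

-- ===== VERDICT =====
theorem tgmk2int_spec : Claim_equal_tgmk2int := by
  intro s _ hpre
  unfold Pre_tgmk2int at hpre
  obtain ⟨h1, h2, h3, h4, h5⟩ := hpre
  have h2' : ∀ c ∈ tgmkBody s, digB c = true ∨ c ∈ tgmkSUF := by
    intro c hc
    have h := List.all_eq_true.mp h2 c hc
    simpa using h
  show tgmk2int s = tgmk2int_alt s
  exact core_eq (tgmkBody s)
    (if PySem.Chars.startswith (PySem.Chars.upper (PySem.Chars.strip s.toList)) ['+'] then 1
     else if PySem.Chars.startswith (PySem.Chars.upper (PySem.Chars.strip s.toList)) ['-'] then -1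
     else 1) h1 h2' h3 h4 h5
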